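-- pv_equiv track=rewrite | github.com/dsmith47/rpg_scripting | calendar/cal.py | first_intersection
-- ===== SOURCE A (Python) =====
-- def first_intersection(m1, b1, m2, b2):
--     x = 0
--     while x < 15:
--         x += 1
--         a = (m1 * x) + b1
--         b = (m2 * x) + b2
--         if a == b : return a
--     return 0
-- ===== SOURCE B (Python) =====
-- def first_intersection(m1, b1, m2, b2):
--     dm = m1 - m2
--     db = b2 - b1
--     if dm == 0:
--         return m1 + b1 if b1 == b2 else 0
--     if db % dm == 0:
--         x = db // dm
--         if 1 <= x <= 15:
--             return m1 * x + b1
--     return 0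
-- ===== Notes on version B (the rewrite author's own statement) =====
-- stated objective: simpler
-- what changed: Replaces the 15-step scan for the first x with a closed-form solve of (m1-m2)*x = b2-b1 via integer divisibility, handling parallel/identical lines directly.
import Mathlib
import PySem

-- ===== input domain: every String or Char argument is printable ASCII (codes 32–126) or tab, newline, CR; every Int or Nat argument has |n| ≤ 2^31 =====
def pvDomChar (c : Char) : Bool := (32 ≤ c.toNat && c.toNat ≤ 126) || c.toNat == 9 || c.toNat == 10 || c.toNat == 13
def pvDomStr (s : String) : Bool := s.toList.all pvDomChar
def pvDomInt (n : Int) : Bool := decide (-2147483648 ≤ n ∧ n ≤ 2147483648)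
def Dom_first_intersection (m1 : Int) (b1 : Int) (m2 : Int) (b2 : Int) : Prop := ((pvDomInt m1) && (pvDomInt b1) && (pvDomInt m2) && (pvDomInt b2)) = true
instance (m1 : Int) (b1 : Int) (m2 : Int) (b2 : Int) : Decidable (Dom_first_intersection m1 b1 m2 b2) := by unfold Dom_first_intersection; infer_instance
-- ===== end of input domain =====

-- B replaces A's 15-iteration scan with a closed-form divisibility solve of (m1-m2)*x = b2-b1 (simpler).


-- ===== PORT A =====
-- the 'while x < 15' loop, with fuel = number of remaining iterations (15 at entry)
def pvLoopA (m1 b1 m2 b2 : Int) : Int → Nat → Int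
  | _, 0 => 0
  | x, Nat.succ f =>
    if x < 15 then
      let x' := x + 1
      let a := m1 * x' + b1
      let b := m2 * x' + b2
      if a = b then a else pvLoopA m1 b1 m2 b2 x' f
    else 0

def first_intersection (m1 : Int) (b1 : Int) (m2 : Int) (b2 : Int) : Int :=
  pvLoopA m1 b1 m2 b2 0 15

-- ===== PORT B =====
def first_intersection_alt (m1 : Int) (b1 : Int) (m2 : Int) (b2 : Int) : Int :=
  let dm := m1 - m2
  let db := b2 - b1
  if dm = 0 then (if b1 = b2 then m1 + b1 else 0)
  else if PySem.Int.mod db dm = 0 then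
    let x := PySem.Int.floordiv db dm
    if 1 ≤ x ∧ x ≤ 15 then m1 * x + b1 else 0
  else 0

-- ===== PRECONDITION & SPEC =====
def Spec_first_intersection (m1 : Int) (b1 : Int) (m2 : Int) (b2 : Int) (out : Int) : Prop := out = first_intersection_alt m1 b1 m2 b2
instance (m1 : Int) (b1 : Int) (m2 : Int) (b2 : Int) (out : Int) : Decidable (Spec_first_intersection m1 b1 m2 b2 out) := by unfold Spec_first_intersection; infer_instance

-- ===== CLAIM (what is proved, stated in full; the proofs are below) =====
def Claim_equal_first_intersection : Prop := ∀ (m1 : Int) (b1 : Int) (m2 : Int) (b2 : Int), Dom_first_intersection m1 b1 m2 b2 → Spec_first_intersection m1 b1 m2 b2 (first_intersection m1 b1 m2 b2)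

-- ===== LEMMAS AND PROOFS =====

-- the loop returns 0 when no x solves the equation
theorem pvLoopA_none (m1 b1 m2 b2 : Int) (h : ∀ x : Int, m1 * x + b1 ≠ m2 * x + b2) :
    ∀ (f : Nat) (x : Int), pvLoopA m1 b1 m2 b2 x f = 0 := by
  intro f
  induction f with
  | zero => intro x; rfl
  | succ f ih =>
    intro x
    simp only [pvLoopA]
    split_ifs with h1 h2
    · exact absurd h2 (h (x + 1))
    · exact ih (x + 1)
    · rfl

-- when the equation has the unique solution x0, the loop returns the hit value iff x0 lies ahead and ≤ 15
theorem pvLoopA_unique (m1 b1 m2 b2 x0 : Int)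
    (hP : ∀ x : Int, m1 * x + b1 = m2 * x + b2 ↔ x = x0) :
    ∀ (f : Nat) (x : Int), x + f = 15 →
      pvLoopA m1 b1 m2 b2 x f = if x < x0 ∧ x0 ≤ 15 then m1 * x0 + b1 else 0 := by
  intro f
  induction f with
  | zero =>
    intro x hx
    have : x = 15 := by omega
    subst this
    simp only [pvLoopA]
    rw [if_neg (by omega)]
  | succ f ih =>
    intro x hx
    simp only [pvLoopA]
    rw [if_pos (by omega)]
    by_cases hhit : m1 * (x + 1) + b1 = m2 * (x + 1) + b2
    · have hx0 : x + 1 = x0 := (hP (x + 1)).mp hhit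
      rw [if_pos hhit, if_pos (by omega)]
      rw [hx0]
    · rw [if_neg hhit]
      have hne : x + 1 ≠ x0 := fun h => hhit ((hP (x + 1)).mpr h)
      rw [ih (x + 1) (by omega)]
      by_cases hcond : x + 1 < x0 ∧ x0 ≤ 15
      · rw [if_pos hcond, if_pos (by omega)]
      · rw [if_neg hcond, if_neg (by omega)]

theorem first_intersection_eq_alt (m1 b1 m2 b2 : Int) :
    first_intersection m1 b1 m2 b2 = first_intersection_alt m1 b1 m2 b2 := by
  unfold first_intersection first_intersection_alt
  by_cases hdm : m1 - m2 = 0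
  · -- parallel lines
    have hm : m1 = m2 := by omega
    rw [if_pos hdm]
    by_cases hb : b1 = b2
    · -- identical lines: first iteration hits at x = 1
      subst hm; subst hb
      simp [pvLoopA]
    · -- no solution at all
      rw [if_neg hb]
      exact pvLoopA_none m1 b1 m2 b2 (fun x => by rw [hm]; omega) 15 0
  · rw [if_neg hdm]
    by_cases hmod : PySem.Int.mod (b2 - b1) (m1 - m2) = 0
    · -- divisible: unique candidate x0
      rw [if_pos hmod]
      have hdvd : (m1 - m2) ∣ (b2 - b1) := (PySem.Int.mod_eq_zero_iff_dvd _ _).mp hmod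
      set x0 := PySem.Int.floordiv (b2 - b1) (m1 - m2) with hx0def
      have hx0 : (m1 - m2) * x0 = b2 - b1 := by
        have h1 := PySem.Int.floordiv_mul_add_mod (b2 - b1) (m1 - m2)
        rw [hmod, ← hx0def] at h1
        linear_combination h1
      have hP : ∀ x : Int, m1 * x + b1 = m2 * x + b2 ↔ x = x0 := by
        intro x
        constructor
        · intro h
          have h2 : (m1 - m2) * x = b2 - b1 := by linear_combination h
          have := hx0
          have : (m1 - m2) * x = (m1 - m2) * x0 := by omega
          exact mul_left_cancel₀ hdm this
        · intro h; subst h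
          linear_combination hx0
      rw [pvLoopA_unique m1 b1 m2 b2 x0 hP 15 0 (by omega)]
      by_cases hc : 1 ≤ x0 ∧ x0 ≤ 15
      · rw [if_pos (by omega), if_pos hc]
      · rw [if_neg (by omega), if_neg hc]
    · -- not divisible: no solution
      rw [if_neg hmod]
      refine pvLoopA_none m1 b1 m2 b2 (fun x h => hmod ?_) 15 0
      have h2 : (m1 - m2) * x = b2 - b1 := by linear_combination h
      exact (PySem.Int.mod_eq_zero_iff_dvd _ _).mpr ⟨x, h2.symm⟩

-- ===== VERDICT (by name: the statement is the Claim_ definition above) =====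
theorem first_intersection_spec : Claim_equal_first_intersection := by
  intro m1 b1 m2 b2 _
  exact first_intersection_eq_alt m1 b1 m2 b2
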